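-- pv_equiv track=rewrite | github.com/haiibarose/ComProgGrader | 09_MoreDC_34.py | pattern3
-- ===== SOURCE A (Python) =====
-- def pattern3(N):
--     ans = [[0 for i in range(N)] for j in range(N)]
--     value = 1
--     for i in range(N):
--         for j in range(N):
--             if i >= j:
--                 ans[i][j] += value
--                 value += 1
--     return ans
-- ===== SOURCE B (Python) =====
-- def pattern3(N):
--     # Closed form: cell (i, j) with i >= j holds i*(i+1)//2 + j + 1
--     # (the count of lower-triangular cells in rows 0..i-1, plus j+1);
--     # no running counter is threaded through the loops.
--     return [[i * (i + 1) // 2 + j + 1 if i >= j else 0 for j in range(N)]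
--             for i in range(N)]
-- ===== Notes on version B (the rewrite author's own statement) =====
-- stated objective: simpler
-- what changed: Replaces the mutated zero matrix and running `value` counter with a single nested comprehension computing each cell directly from its indices via the closed form i*(i+1)//2 + j + 1.
import Mathlib
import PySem

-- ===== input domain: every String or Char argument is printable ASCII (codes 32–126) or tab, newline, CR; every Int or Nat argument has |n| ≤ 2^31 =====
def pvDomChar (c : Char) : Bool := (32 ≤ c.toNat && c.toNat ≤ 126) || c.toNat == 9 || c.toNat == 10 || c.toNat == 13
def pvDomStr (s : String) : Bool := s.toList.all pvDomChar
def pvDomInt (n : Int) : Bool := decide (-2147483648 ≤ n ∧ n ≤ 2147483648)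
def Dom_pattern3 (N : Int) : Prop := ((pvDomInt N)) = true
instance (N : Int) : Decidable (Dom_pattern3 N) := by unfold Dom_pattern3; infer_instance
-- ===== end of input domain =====

-- B replaces A's mutated zero matrix and running counter with a closed-form
-- per-cell formula i*(i+1)//2 + j + 1 in a nested comprehension (objective: simpler).


-- ===== PORT A =====
-- inner-loop body: 'if i >= j: ans[i][j] += value; value += 1' on state (ans, value)
def pattern3StepJ (i : Int) (st : List (List Int) × Int) (j : Int) : List (List Int) × Int :=
  if i ≥ j then
    let row := PySem.List.pyGetD st.1 i []
    (PySem.List.pySetD st.1 i (PySem.List.pySetD row j (PySem.List.pyGetD row j 0 + st.2)),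
     st.2 + 1)
  else st

-- outer-loop body: 'for j in range(N): …'
def pattern3StepI (N : Int) (st : List (List Int) × Int) (i : Int) : List (List Int) × Int :=
  (PySem.List.pyRange 0 N 1).foldl (pattern3StepJ i) st

def pattern3 (N : Int) : List (List Int) :=
  let ans : List (List Int) :=
    (PySem.List.pyRange 0 N 1).map (fun _ => (PySem.List.pyRange 0 N 1).map (fun _ => (0 : Int)))
  ((PySem.List.pyRange 0 N 1).foldl (pattern3StepI N) (ans, 1)).1

-- ===== PORT B =====
def pattern3_alt (N : Int) : List (List Int) :=
  (PySem.List.pyRange 0 N 1).map (fun i =>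
    (PySem.List.pyRange 0 N 1).map (fun j =>
      if i ≥ j then PySem.Int.floordiv (i * (i + 1)) 2 + j + 1 else 0))

-- ===== PRECONDITION & SPEC =====
def Spec_pattern3 (N : Int) (out : List (List Int)) : Prop := out = pattern3_alt N
instance (N : Int) (out : List (List Int)) : Decidable (Spec_pattern3 N out) := by unfold Spec_pattern3; infer_instance

-- ===== CLAIM (what is proved, stated in full; the proofs are below) =====
def Claim_equal_pattern3 : Prop := ∀ (N : Int), Dom_pattern3 N → Spec_pattern3 N (pattern3 N)

-- ===== LEMMAS AND PROOFS =====

-- triangular numbers: how many values rows 0..m-1 consume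
def pvTri : Nat → Int
  | 0 => 0
  | m + 1 => pvTri m + (m + 1)

lemma pvTri_two (m : Nat) : pvTri m * 2 = (m : Int) * ((m : Int) + 1) := by
  induction m with
  | zero => simp [pvTri]
  | succ k ih => simp only [pvTri]; push_cast; push_cast at ih; ring_nf; ring_nf at ih; omega

lemma pvTri_floordiv (m : Nat) :
    PySem.Int.floordiv ((m : Int) * ((m : Int) + 1)) 2 = pvTri m := by
  rw [PySem.Int.floordiv_eq_ediv_of_pos (by norm_num), ← pvTri_two m]
  exact Int.mul_ediv_cancel _ (by norm_num)

-- row-level step: the inner body acting on the single touched row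
def pvRowStep (i : Int) (st : List Int × Int) (j : Int) : List Int × Int :=
  if i ≥ j then (PySem.List.pySetD st.1 j (PySem.List.pyGetD st.1 j 0 + st.2), st.2 + 1) else st

-- the matrix-level inner fold only touches row i
lemma pvStepJ_factor (l : List Int) :
    ∀ (M : List (List Int)) (v : Int) (i : Nat), i < M.length →
    l.foldl (pattern3StepJ (i : Int)) (M, v)
    = (PySem.List.pySetD M (i : Int)
        ((l.foldl (pvRowStep (i : Int)) (PySem.List.pyGetD M (i : Int) [], v)).1),
       (l.foldl (pvRowStep (i : Int)) (PySem.List.pyGetD M (i : Int) [], v)).2) := by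
  induction l with
  | nil =>
      intro M v i hi
      simp [PySem.List.pySetD_natCast, PySem.List.pyGetD_natCast,
        List.getD_eq_getElem?_getD, List.getElem?_eq_getElem hi, List.set_getElem_self]
  | cons j l ih =>
      intro M v i hi
      simp only [List.foldl_cons]
      by_cases h : (i : Int) ≥ j
      · have e1 : pattern3StepJ (i : Int) (M, v) j
            = (PySem.List.pySetD M (i : Int) (PySem.List.pySetD (PySem.List.pyGetD M (i : Int) []) j
                (PySem.List.pyGetD (PySem.List.pyGetD M (i : Int) []) j 0 + v)), v + 1) := by
          simp [pattern3StepJ, h]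
        have e2 : pvRowStep (i : Int) (PySem.List.pyGetD M (i : Int) [], v) j
            = (PySem.List.pySetD (PySem.List.pyGetD M (i : Int) []) j
                (PySem.List.pyGetD (PySem.List.pyGetD M (i : Int) []) j 0 + v), v + 1) := by
          simp [pvRowStep, h]
        rw [e1, e2]
        set r := PySem.List.pySetD (PySem.List.pyGetD M (i : Int) []) j
          (PySem.List.pyGetD (PySem.List.pyGetD M (i : Int) []) j 0 + v) with hr
        rw [ih (PySem.List.pySetD M (i : Int) r) (v + 1) i
          (by simpa [PySem.List.pySetD_natCast] using hi)]
        have hget : PySem.List.pyGetD (PySem.List.pySetD M (i : Int) r) (i : Int) [] = r := by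
          simp [PySem.List.pySetD_natCast, PySem.List.pyGetD_natCast,
            List.getD_eq_getElem?_getD, List.getElem?_set_self, hi]
        have hset : ∀ x : List Int, PySem.List.pySetD (PySem.List.pySetD M (i : Int) r) (i : Int) x
            = PySem.List.pySetD M (i : Int) x := by
          intro x; simp [PySem.List.pySetD_natCast, List.set_set]
        rw [hget, hset]
      · have e1 : pattern3StepJ (i : Int) (M, v) j = (M, v) := by simp [pattern3StepJ, h]
        have e2 : pvRowStep (i : Int) (PySem.List.pyGetD M (i : Int) [], v) j
            = (PySem.List.pyGetD M (i : Int) [], v) := by simp [pvRowStep, h]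
        rw [e1, e2]; exact ih M v i hi

-- partially filled row: cells j < m with j ≤ i hold v + j
def pvRowPartial (n i m : Nat) (v : Int) : List Int :=
  (List.range n).map (fun j => if j < m ∧ j ≤ i then v + (j : Int) else 0)

lemma pvRowFold (n : Nat) (i : Nat) (v : Int) :
    ∀ (m : Nat), m ≤ n →
    (PySem.List.pyRange 0 (m : Int) 1).foldl (pvRowStep (i : Int)) (pvRowPartial n i 0 v, v)
    = (pvRowPartial n i m v, v + min m (i + 1)) := by
  intro m
  induction m with
  | zero => intro _; simp [PySem.List.pyRange_one_eq_nil]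
  | succ m ih =>
      intro hm
      have h1 : ((m : Int) + 1) = ((m + 1 : Nat) : Int) := by push_cast; ring
      rw [← h1, PySem.List.pyRange_one_succ_right (by positivity),
        List.foldl_append, ih (by omega)]
      simp only [List.foldl_cons, List.foldl_nil, pvRowStep]
      have hm' : m < n := by omega
      by_cases h : m ≤ i
      · have hmin : min m (i + 1) = m := by omega
        have hget : PySem.List.pyGetD (pvRowPartial n i m v) (m : Int) 0 = 0 := by
          simp [pvRowPartial, List.getD_eq_getElem?_getD, hm']
        rw [if_pos (by exact_mod_cast h), hget, hmin, PySem.List.pySetD_natCast]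
        simp only [Prod.mk.injEq]
        refine ⟨?_, by omega⟩
        apply List.ext_getElem
        · simp [pvRowPartial]
        · intro k hk1 hk2
          rw [List.getElem_set]
          by_cases hkm : k = m
          · subst hkm
            simp [pvRowPartial, hm', h]
          · rw [if_neg (fun e => hkm e.symm)]
            simp only [pvRowPartial, List.length_map, List.length_range] at hk1 hk2
            simp only [pvRowPartial, List.getElem_map, List.getElem_range]
            have heq : (k < m ∧ k ≤ i) ↔ (k < m + 1 ∧ k ≤ i) := by omega
            simp only [heq]
      · have hi2 : ¬ ((i : Int) ≥ (m : Int)) := by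
          intro hc; exact h (by exact_mod_cast hc)
        rw [if_neg hi2]
        simp only [Prod.mk.injEq]
        refine ⟨?_, by omega⟩
        unfold pvRowPartial
        apply List.map_congr_left
        intro k _
        have heq : (k < m ∧ k ≤ i) ↔ (k < m + 1 ∧ k ≤ i) := by omega
        simp only [heq]

-- matrix with the first m rows filled by the closed form
def pvMat (n m : Nat) : List (List Int) :=
  (List.range n).map (fun i =>
    (List.range n).map (fun j => if i < m ∧ j ≤ i then pvTri i + 1 + (j : Int) else 0))

lemma pvMat_length (n m : Nat) : (pvMat n m).length = n := by simp [pvMat]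

lemma pvMat_row (n m i : Nat) (v : Int) (hi : i < n) (h : ¬ i < m) :
    PySem.List.pyGetD (pvMat n m) (i : Int) [] = pvRowPartial n i 0 v := by
  simp [pvMat, pvRowPartial, List.getD_eq_getElem?_getD, hi, h]

lemma pvOuterFold (n : Nat) :
    ∀ (m : Nat), m ≤ n →
    (PySem.List.pyRange 0 (m : Int) 1).foldl (pattern3StepI (n : Int)) (pvMat n 0, 1)
    = (pvMat n m, 1 + pvTri m) := by
  intro m
  induction m with
  | zero => intro _; simp [PySem.List.pyRange_one_eq_nil, pvTri]
  | succ m ih =>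
      intro hm
      have h1 : ((m : Int) + 1) = ((m + 1 : Nat) : Int) := by push_cast; ring
      rw [← h1, PySem.List.pyRange_one_succ_right (by positivity),
        List.foldl_append, ih (by omega)]
      simp only [List.foldl_cons, List.foldl_nil, pattern3StepI]
      have hm' : m < n := by omega
      rw [pvStepJ_factor _ _ _ m (by simpa [pvMat_length] using hm'),
        pvMat_row n m m (1 + pvTri m) hm' (by omega),
        pvRowFold n m (1 + pvTri m) n le_rfl, PySem.List.pySetD_natCast]
      simp only [Prod.mk.injEq]
      constructor
      · apply List.ext_getElem
        · simp [pvMat, pvRowPartial]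
        · intro k hk1 hk2
          simp only [pvMat, List.length_map, List.length_range, List.length_set] at hk1 hk2
          rw [List.getElem_set]
          by_cases hkm : m = k
          · subst hkm
            rw [if_pos rfl]
            simp only [pvRowPartial, pvMat, List.getElem_map, List.getElem_range]
            apply List.map_congr_left
            intro j hj
            simp only [List.mem_range] at hj
            have heq : (j < n ∧ j ≤ m) ↔ (m < m + 1 ∧ j ≤ m) := by omega
            simp only [heq]
            split_ifs
            · ring
            · rfl
          · rw [if_neg hkm]
            simp only [pvMat, List.getElem_map, List.getElem_range]
            apply List.map_congr_left
            intro j _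
            have hkm' : k ≠ m := fun e => hkm e.symm
            have heq : (k < m ∧ j ≤ k) ↔ (k < m + 1 ∧ j ≤ k) := by omega
            simp only [heq]
      · have hmin : min n (m + 1) = m + 1 := by omega
        simp only [hmin, pvTri]
        push_cast
        ring

lemma pvAlt_eq (n : Nat) : pattern3_alt (n : Int) = pvMat n n := by
  unfold pattern3_alt pvMat
  rw [PySem.List.pyRange_one]
  simp only [Int.sub_zero, Int.toNat_natCast, List.map_map, Function.comp_def, zero_add]
  apply List.map_congr_left
  intro i hi
  simp only [List.mem_range] at hi
  apply List.map_congr_left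
  intro j hj
  simp only [List.mem_range] at hj
  have hij : ((i : Int) ≥ (j : Int)) ↔ j ≤ i := by omega
  by_cases h : j ≤ i
  · rw [if_pos (hij.mpr h), if_pos (And.intro hi h), pvTri_floordiv]
    ring
  · rw [if_neg (fun hc => h (hij.mp hc)), if_neg (by omega)]

-- ===== VERDICT (by name: the statement is the Claim_ definition above) =====
theorem pattern3_spec : Claim_equal_pattern3 := by
  intro N _
  unfold Spec_pattern3
  by_cases hN : N ≤ 0
  · simp [pattern3, pattern3_alt, PySem.List.pyRange_one_eq_nil hN]
  · push_neg at hN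
    have hNn : N = (N.toNat : Int) := by omega
    rw [hNn]
    set n := N.toNat
    unfold pattern3
    have hzero :
        (PySem.List.pyRange 0 (n : Int) 1).map
            (fun _ => (PySem.List.pyRange 0 (n : Int) 1).map fun _ => (0 : Int))
          = pvMat n 0 := by
      rw [PySem.List.pyRange_one]
      simp only [Int.sub_zero, Int.toNat_natCast, List.map_map, Function.comp_def]
      unfold pvMat
      apply List.map_congr_left
      intro i _
      apply List.map_congr_left
      intro j _
      simp
    rw [hzero]
    show ((PySem.List.pyRange 0 (n : Int) 1).foldl (pattern3StepI (n : Int)) (pvMat n 0, 1)).1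
      = pattern3_alt (n : Int)
    rw [pvOuterFold n n le_rfl, pvAlt_eq]
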